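-- pv_equiv track=rewrite | github.com/sgorelik/susan | app/slack_api.py | _md_double_star_to_slack_bold
-- ===== SOURCE A (Python) =====
-- def _md_double_star_to_slack_bold(s: str) -> str:
--     """Turn **commonmark bold** into Slack mrkdwn *bold* (non-nested segments)."""
--     out: list[str] = []
--     i = 0
--     while True:
--         a = s.find("**", i)
--         if a == -1:
--             out.append(s[i:])
--             break
--         out.append(s[i:a])
--         b = s.find("**", a + 2)
--         if b == -1:
--             out.append(s[a:])
--             break
--         inner = s[a + 2 : b].replace("*", "")
--         out.append(f"*{inner}*")
--         i = b + 2
--     return "".join(out)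
-- ===== SOURCE B (Python) =====
-- def _md_double_star_to_slack_bold(s: str) -> str:
--     """One-pass state machine: copy chars; between a '**' pair buffer the segment,
--     then emit *segment* with stray single '*'s removed; an unclosed '**' is kept verbatim."""
--     out = []
--     inside = False
--     buf = ""
--     i = 0
--     n = len(s)
--     while i < n:
--         if s.startswith("**", i):
--             if inside:
--                 out.append("*" + buf.replace("*", "") + "*")
--                 buf = ""
--                 inside = False
--             else:
--                 inside = True
--             i += 2
--         elif inside:
--             buf += s[i]
--             i += 1
--         else:
--             out.append(s[i])
--             i += 1
--     if inside:
--         out.append("**" + buf)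
--     return "".join(out)
-- ===== Notes on version B (the rewrite author's own statement) =====
-- stated objective: alternative
-- what changed: Replaces A's repeated s.find('**', i) substring searches plus slicing with a single left-to-right character scan that keeps an inside/outside state and a segment buffer, emitting each bold segment when its closing '**' is seen.
import Mathlib
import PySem

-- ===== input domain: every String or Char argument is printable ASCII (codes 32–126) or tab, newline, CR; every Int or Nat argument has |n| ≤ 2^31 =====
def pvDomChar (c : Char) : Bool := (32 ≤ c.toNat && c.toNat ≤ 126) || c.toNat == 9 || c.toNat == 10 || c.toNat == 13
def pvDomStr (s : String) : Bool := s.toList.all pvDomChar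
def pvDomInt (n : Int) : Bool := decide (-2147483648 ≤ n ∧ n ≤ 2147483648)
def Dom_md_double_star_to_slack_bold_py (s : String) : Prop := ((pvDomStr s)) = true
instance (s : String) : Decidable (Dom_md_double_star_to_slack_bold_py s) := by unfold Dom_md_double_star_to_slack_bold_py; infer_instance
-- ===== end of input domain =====

-- B replaces A's repeated substring-find-and-slice loop by a single left-to-right
-- character scan with an inside/outside state and a segment buffer (objective: alternative).

-- ===== PORT A =====
-- A's while-loop advances an index i through s; the port keeps the equivalent
-- remaining suffix rest = s[i:]  (s.find("**", i) = i + rest.find("**") when found;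
-- every slice of s at positions ≥ i becomes the same slice of rest), and the final
-- "".join(out) of the appended pieces is the concatenation accumulated below.
def goA (rest : List Char) : List Char :=
  let a := PySem.Chars.find rest ['*', '*']          -- a = s.find("**", i)
  if _ha : a = -1 then rest                          -- out.append(s[i:]); break
  else
    let aN := a.toNat
    let tail := rest.drop (aN + 2)                   -- s[a+2:]
    let b := PySem.Chars.find tail ['*', '*']        -- b = s.find("**", a+2)
    if b = -1 then rest.take aN ++ rest.drop aN      -- out.append(s[i:a]); out.append(s[a:]); break
    else
      let bN := b.toNat
      let inner := PySem.Chars.replace (tail.take bN) ['*'] []   -- s[a+2:b].replace("*","")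
      rest.take aN ++ ('*' :: inner ++ ['*']) ++ goA (tail.drop (bN + 2))   -- i = b+2
termination_by rest.length
decreasing_by
  have h2 : ('*' :: '*' :: ([] : List Char)).length ≤ rest.length := by
    have := PySem.Chars.find_ne_neg_one_iff (s := rest) (sub := ['*','*']) |>.mp _ha
    exact this.length_le
  simp only [List.length_cons, List.length_nil] at h2
  simp only [List.length_drop]
  omega

def md_double_star_to_slack_bold_py (s : String) : String :=
  String.ofList (goA s.toList)

-- ===== PORT B =====
-- Source B's single pass: while i < n — s.startswith("**", i) flips the state (emitting
-- the '*'-stripped buffer in single stars when it closes a pair); otherwise the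
-- character goes to the buffer (inside) or to the output (outside); an unclosed
-- "**" plus its buffer is appended verbatim at the end.
def goB : List Char → Bool → List Char → List Char → List Char
  | [], inside, buf, out => if inside then out ++ '*' :: '*' :: buf else out
  | c :: rest, inside, buf, out =>
    if PySem.Chars.startswith (c :: rest) ['*', '*'] then      -- s.startswith("**", i)
      if inside then                                           -- close: out.append("*" + buf.replace("*","") + "*")
        goB (rest.drop 1) false [] (out ++ '*' :: PySem.Chars.replace buf ['*'] [] ++ ['*'])
      else
        goB (rest.drop 1) true buf out                         -- open; i += 2
    else
      if inside then goB rest true (buf ++ [c]) out            -- buf += s[i]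
      else goB rest false buf (out ++ [c])                     -- out.append(s[i])
termination_by cs => cs.length
decreasing_by
  · simp
  · simp
  · simp
  · simp

def md_double_star_to_slack_bold_py_alt (s : String) : String :=
  String.ofList (goB s.toList false [] [])

-- ===== PRECONDITION & SPEC =====
def Spec_md_double_star_to_slack_bold_py (s : String) (out : String) : Prop := out = md_double_star_to_slack_bold_py_alt s
instance (s : String) (out : String) : Decidable (Spec_md_double_star_to_slack_bold_py s out) := by unfold Spec_md_double_star_to_slack_bold_py; infer_instance

-- ===== CLAIM (what is proved, stated in full; the proofs are below) =====
def Claim_equal_md_double_star_to_slack_bold_py : Prop := ∀ (s : String), Dom_md_double_star_to_slack_bold_py s → Spec_md_double_star_to_slack_bold_py s (md_double_star_to_slack_bold_py s)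

-- ===== LEMMAS AND PROOFS =====

-- no occurrence of "**", outside a pair: goB copies everything to out
theorem goB_copy_out (cs : List Char) (out : List Char)
    (h : ¬ ['*','*'] <:+: cs) : goB cs false [] out = out ++ cs := by
  induction cs generalizing out with
  | nil => simp [goB]
  | cons c rest ih =>
    have hs : PySem.Chars.startswith (c :: rest) ['*','*'] = false := by
      rw [Bool.eq_false_iff]
      intro hT
      exact h ((PySem.Chars.startswith_iff _ _).mp hT).isInfix
    rw [goB, hs]
    simp only [Bool.false_eq_true, if_false]
    rw [ih _ (fun hi => h (List.infix_cons hi))]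
    simp

-- no occurrence of "**", inside a pair: the unclosed "**" and buffer come out verbatim
theorem goB_copy_in (cs : List Char) (buf out : List Char)
    (h : ¬ ['*','*'] <:+: cs) : goB cs true buf out = out ++ '*' :: '*' :: (buf ++ cs) := by
  induction cs generalizing buf out with
  | nil => simp [goB]
  | cons c rest ih =>
    have hs : PySem.Chars.startswith (c :: rest) ['*','*'] = false := by
      rw [Bool.eq_false_iff]
      intro hT
      exact h ((PySem.Chars.startswith_iff _ _).mp hT).isInfix
    rw [goB, hs]
    simp only [if_pos]
    rw [ih _ _ (fun hi => h (List.infix_cons hi))]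
    simp

-- outside mode walks over a "**"-free prefix of length k, copying it to out
theorem goB_skip_out (k : Nat) (cs : List Char) (out : List Char)
    (hk : k ≤ cs.length) (h : ∀ i < k, ¬ ['*','*'] <+: cs.drop i) :
    goB cs false [] out = goB (cs.drop k) false [] (out ++ cs.take k) := by
  induction k generalizing cs out with
  | zero => simp
  | succ k ih =>
    cases cs with
    | nil => simp at hk
    | cons c rest =>
      have hs : PySem.Chars.startswith (c :: rest) ['*','*'] = false := by
        rw [Bool.eq_false_iff]
        intro hT
        exact h 0 (Nat.succ_pos k) ((PySem.Chars.startswith_iff _ _).mp hT)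
      rw [goB, hs]
      simp only [Bool.false_eq_true, if_false]
      rw [ih rest (out ++ [c]) (by simpa using hk) (fun i hi => h (i+1) (by omega))]
      simp

-- inside mode walks over a "**"-free prefix of length k, buffering it
theorem goB_skip_in (k : Nat) (cs : List Char) (buf out : List Char)
    (hk : k ≤ cs.length) (h : ∀ i < k, ¬ ['*','*'] <+: cs.drop i) :
    goB cs true buf out = goB (cs.drop k) true (buf ++ cs.take k) out := by
  induction k generalizing cs buf out with
  | zero => simp
  | succ k ih =>
    cases cs with
    | nil => simp at hk
    | cons c rest =>
      have hs : PySem.Chars.startswith (c :: rest) ['*','*'] = false := by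
        rw [Bool.eq_false_iff]
        intro hT
        exact h 0 (Nat.succ_pos k) ((PySem.Chars.startswith_iff _ _).mp hT)
      rw [goB, hs]
      simp only [if_pos]
      rw [ih rest _ _ (by simpa using hk) (fun i hi => h (i+1) (by omega))]
      simp

-- main invariant: B's scan from any accumulated out equals out ++ A's result,
-- by strong induction on the length, splitting at the first "**" (find_spec)
theorem goB_eq_goA_aux (n : Nat) : ∀ cs : List Char, cs.length ≤ n →
    ∀ out : List Char, goB cs false [] out = out ++ goA cs := by
  induction n with
  | zero =>
    intro cs hlen out
    have : cs = [] := List.length_eq_zero_iff.mp (Nat.le_zero.mp hlen)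
    subst this
    have hf : PySem.Chars.find ([] : List Char) ['*','*'] = -1 :=
      (PySem.Chars.find_eq_neg_one_iff _ _).mpr (by simp)
    rw [goA]
    simp only [dif_pos hf]
    simp [goB]
  | succ n ih =>
    intro cs hlen out
    by_cases ha : PySem.Chars.find cs ['*','*'] = -1
    · rw [goA]
      simp only [dif_pos ha]
      exact goB_copy_out cs out ((PySem.Chars.find_eq_neg_one_iff _ _).mp ha)
    · -- first occurrence at aN
      have h0 : 0 ≤ PySem.Chars.find cs ['*','*'] := by
        have := PySem.Chars.neg_one_le_find (s := cs) (sub := ['*','*'])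
        omega
      set aN := (PySem.Chars.find cs ['*','*']).toNat with haN
      obtain ⟨hpre, hmin⟩ := PySem.Chars.find_spec (s := cs) (sub := ['*','*']) h0
      obtain ⟨t, ht⟩ := hpre
      have haNle : aN ≤ cs.length := by
        have := PySem.Chars.find_le_length (s := cs) (sub := ['*','*'])
        omega
      have hdropA : cs.drop aN = '*' :: '*' :: t := ht.symm
      have ht2 : cs.drop (aN + 2) = t := by
        have : cs.drop (aN + 2) = (cs.drop aN).drop 2 := by
          rw [List.drop_drop]
        rw [this, hdropA]
        rfl
      -- goB copies the "**"-free prefix, then steps over the opening "**"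
      rw [goB_skip_out aN cs out haNle hmin, hdropA]
      rw [goB]
      have hsw : PySem.Chars.startswith ('*' :: '*' :: t) ['*','*'] = true :=
        (PySem.Chars.startswith_iff _ _).mpr ⟨t, rfl⟩
      rw [hsw]
      simp only [if_pos, Bool.false_eq_true, if_false, List.drop_one, List.tail_cons]
      by_cases hb : PySem.Chars.find t ['*','*'] = -1
      · -- unmatched opener: both sides reproduce the rest verbatim
        rw [goB_copy_in t [] _ ((PySem.Chars.find_eq_neg_one_iff _ _).mp hb)]
        rw [goA]
        simp only [dif_neg ha, ← haN, ht2, if_pos hb, List.nil_append]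
        rw [← hdropA]
        simp
      · -- matched pair: buffer up to the closing "**", emit, recurse
        have h0b : 0 ≤ PySem.Chars.find t ['*','*'] := by
          have := PySem.Chars.neg_one_le_find (s := t) (sub := ['*','*'])
          omega
        set bN := (PySem.Chars.find t ['*','*']).toNat with hbN
        obtain ⟨hpreb, hminb⟩ := PySem.Chars.find_spec (s := t) (sub := ['*','*']) h0b
        obtain ⟨u, hu⟩ := hpreb
        have hbNle : bN ≤ t.length := by
          have := PySem.Chars.find_le_length (s := t) (sub := ['*','*'])
          omega
        have hdropB : t.drop bN = '*' :: '*' :: u := hu.symm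
        have hu2 : t.drop (bN + 2) = u := by
          have : t.drop (bN + 2) = (t.drop bN).drop 2 := by rw [List.drop_drop]
          rw [this, hdropB]
          rfl
        rw [goB_skip_in bN t [] _ hbNle hminb, hdropB]
        rw [goB]
        have hswb : PySem.Chars.startswith ('*' :: '*' :: u) ['*','*'] = true :=
          (PySem.Chars.startswith_iff _ _).mpr ⟨u, rfl⟩
        rw [hswb]
        simp only [if_pos, List.drop_one, List.tail_cons, List.nil_append]
        have hulen : u.length < cs.length := by
          have hlenA : aN + 2 ≤ cs.length := by
            have h1 : (cs.drop aN).length = cs.length - aN := List.length_drop ..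
            rw [hdropA] at h1
            simp at h1
            omega
          have h1 : t.length = cs.length - (aN + 2) := by
            rw [← ht2]
            exact List.length_drop ..
          have h2 : (t.drop bN).length = t.length - bN := List.length_drop ..
          rw [hdropB] at h2
          simp at h2
          omega
        rw [ih u (by omega) _]
        conv_rhs => rw [goA]
        simp only [dif_neg ha, ← haN, ht2, if_neg hb, ← hbN, hu2]
        simp

-- ===== VERDICT (by name: the statement is the Claim_ definition above) =====
theorem md_double_star_to_slack_bold_py_spec : Claim_equal_md_double_star_to_slack_bold_py := by
  intro s _
  unfold Spec_md_double_star_to_slack_bold_py md_double_star_to_slack_bold_py md_double_star_to_slack_bold_py_alt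
  rw [goB_eq_goA_aux s.toList.length s.toList le_rfl []]
  rfl
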